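-- pv_equiv track=rewrite | github.com/Lokesh-2509/Count_of_array_elements | main.py | count_elements_with_greater
-- ===== SOURCE A (Python) =====
-- def count_elements_with_greater(arr):
--     count = 0
--     n = len(arr)
--     for i in range(n):
--         has_greater = False
--         for j in range(n):
--             if i != j and arr[j] > arr[i]:
--                 has_greater = True
--                 break
--         if has_greater:
--             count += 1
--     return count
-- ===== SOURCE B (Python) =====
-- def count_elements_with_greater(arr):
--     if not arr:
--         return 0
--     m = max(arr)
--     return sum(1 for x in arr if x < m)
-- ===== Notes on version B (the rewrite author's own statement) =====
-- stated objective: faster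
-- what changed: Replaces the nested index scan with one max() pass and one counting pass: an element has a strictly greater element exactly when it is below the maximum.
import Mathlib
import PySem

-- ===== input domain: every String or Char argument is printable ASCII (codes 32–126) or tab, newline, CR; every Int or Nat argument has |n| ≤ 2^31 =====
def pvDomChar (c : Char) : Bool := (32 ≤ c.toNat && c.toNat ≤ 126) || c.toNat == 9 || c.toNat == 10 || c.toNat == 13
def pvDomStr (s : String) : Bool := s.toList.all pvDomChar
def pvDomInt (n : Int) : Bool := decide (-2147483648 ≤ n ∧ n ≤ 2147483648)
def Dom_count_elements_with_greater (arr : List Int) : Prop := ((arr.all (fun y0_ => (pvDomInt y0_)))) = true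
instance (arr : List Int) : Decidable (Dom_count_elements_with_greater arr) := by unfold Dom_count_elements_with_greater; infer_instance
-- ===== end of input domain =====

-- B replaces A's O(n^2) nested index scan by one max pass and one counting pass (x has a greater element iff x < max).

-- ===== PORT A =====
-- inner 'for j in range(n)' with its break: returns true as soon as i != j and arr[j] > arr[i]
def pvLoopJ (arr : List Int) (i : Int) : List Int → Bool
  | [] => false
  | j :: rest =>
      if i ≠ j ∧ PySem.List.pyGetD arr i 0 < PySem.List.pyGetD arr j 0 then true
      else pvLoopJ arr i rest

def count_elements_with_greater (arr : List Int) : Int :=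
  (PySem.List.pyRange 0 arr.length 1).foldl
    (fun count i =>
      if pvLoopJ arr i (PySem.List.pyRange 0 arr.length 1) then count + 1 else count) 0

-- ===== PORT B =====
def count_elements_with_greater_alt (arr : List Int) : Int :=
  if arr = [] then 0
  else
    match PySem.List.max? arr (fun x => x) with
    | none => 0
    | some m => ((arr.filter (fun x => x < m)).length : Int)

-- ===== PRECONDITION & SPEC =====
def Spec_count_elements_with_greater (arr : List Int) (out : Int) : Prop := out = count_elements_with_greater_alt arr
instance (arr : List Int) (out : Int) : Decidable (Spec_count_elements_with_greater arr out) := by unfold Spec_count_elements_with_greater; infer_instance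

-- ===== CLAIM (what is proved, stated in full; the proofs are below) =====
def Claim_equal_count_elements_with_greater : Prop := ∀ (arr : List Int), Dom_count_elements_with_greater arr → Spec_count_elements_with_greater arr (count_elements_with_greater arr)

-- ===== LEMMAS AND PROOFS =====

-- the inner loop (with break) is an existence test over the scanned indices
lemma pvLoopJ_eq_true_iff (arr : List Int) (i : Int) (js : List Int) :
    pvLoopJ arr i js = true ↔
      ∃ j ∈ js, i ≠ j ∧ PySem.List.pyGetD arr i 0 < PySem.List.pyGetD arr j 0 := by
  induction js with
  | nil => simp [pvLoopJ]
  | cons j rest ih =>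
      by_cases h : i ≠ j ∧ PySem.List.pyGetD arr i 0 < PySem.List.pyGetD arr j 0
      · simp only [pvLoopJ, if_pos h]
        exact iff_of_true trivial ⟨j, List.mem_cons_self, h⟩
      · simp only [pvLoopJ, if_neg h, ih]
        constructor
        · rintro ⟨x, hx, hne, hlt⟩; exact ⟨x, List.mem_cons_of_mem _ hx, hne, hlt⟩
        · rintro ⟨x, hx, hne, hlt⟩
          rcases List.mem_cons.mp hx with rfl | hx
          · exact absurd ⟨hne, hlt⟩ h
          · exact ⟨x, hx, hne, hlt⟩

-- on a valid index, the inner loop tests 'arr[i] < max arr'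
lemma pvLoopJ_iff_lt_max (arr : List Int) (m : Int)
    (hm : PySem.List.max? arr (fun x => x) = some m) (i : Int)
    (h0 : 0 ≤ i) (hi : i < (arr.length : Int)) :
    pvLoopJ arr i (PySem.List.pyRange 0 arr.length 1) = true ↔
      PySem.List.pyGetD arr i 0 < m := by
  rw [pvLoopJ_eq_true_iff]
  constructor
  · rintro ⟨j, hj, -, hlt⟩
    rw [PySem.List.mem_pyRange_one] at hj
    have hjmem : PySem.List.pyGetD arr j 0 ∈ arr := by
      have : j.toNat < arr.length := by omega
      rw [PySem.List.pyGetD_of_nonneg arr 0 hj.1, List.getD_eq_getElem _ _ this]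
      exact List.getElem_mem _
    exact lt_of_lt_of_le hlt (PySem.List.max?_isMax hm _ hjmem)
  · intro hlt
    have hmem : m ∈ arr := PySem.List.max?_mem hm
    rcases List.mem_iff_getElem.mp hmem with ⟨k, hk, hkeq⟩
    refine ⟨(k : Int), ?_, ?_, ?_⟩
    · rw [PySem.List.mem_pyRange_one]
      exact ⟨Int.natCast_nonneg k, by exact_mod_cast hk⟩
    · intro hik
      have : PySem.List.pyGetD arr i 0 = m := by
        rw [hik, PySem.List.pyGetD_natCast, List.getD_eq_getElem _ _ hk, hkeq]
      omega
    · rwa [PySem.List.pyGetD_natCast, List.getD_eq_getElem _ _ hk, hkeq]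

theorem count_elements_with_greater_eq (arr : List Int) :
    count_elements_with_greater arr = count_elements_with_greater_alt arr := by
  unfold count_elements_with_greater count_elements_with_greater_alt
  rcases eq_or_ne arr [] with rfl | hne
  · simp [PySem.List.pyRange]
  · simp only [if_neg hne]
    obtain ⟨m, hm⟩ : ∃ m, PySem.List.max? arr (fun x => x) = some m := by
      rcases h : PySem.List.max? arr (fun x => x) with _ | m
      · exact absurd ((PySem.List.max?_eq_none_iff arr (fun x => x)).mp h) hne
      · exact ⟨m, rfl⟩
    rw [hm, PySem.List.foldl_count_if, zero_add]
    have key : (PySem.List.pyRange 0 (arr.length : Int) 1).countP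
        (fun i => pvLoopJ arr i (PySem.List.pyRange 0 arr.length 1))
        = arr.countP (fun x => decide (x < m)) := by
      conv_rhs => rw [← PySem.List.map_pyGetD_pyRange_zero' arr 0]
      rw [List.countP_map]
      refine List.countP_congr (fun i hi => ?_)
      rw [PySem.List.mem_pyRange_one] at hi
      simp [Function.comp, pvLoopJ_iff_lt_max arr m hm i hi.1 hi.2]
    rw [key, List.countP_eq_length_filter]

-- ===== VERDICT (by name: the statement is the Claim_ definition above) =====
theorem count_elements_with_greater_spec : Claim_equal_count_elements_with_greater := by
  intro arr _
  exact count_elements_with_greater_eq arr
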